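-- pv_equiv track=rewrite | github.com/Melaniegarcialapegna/TP1-FP | TP1/sixteen.py | esta_ordenado
-- ===== SOURCE A (Python) =====
-- def esta_ordenado(tablero: list[list[int]]) -> bool:
--     contador = 1
--     for fila in tablero:
--         for columna in fila:
--             if columna != contador:
--                 return False
--             contador += 1
--     return True
-- ===== SOURCE B (Python) =====
-- def esta_ordenado(tablero: list[list[int]]) -> bool:
--     flat = [columna for fila in tablero for columna in fila]
--     return flat == list(range(1, len(flat) + 1))
-- ===== Notes on version B (the rewrite author's own statement) =====
-- stated objective: simpler
-- what changed: B flattens the board and compares it wholesale against the reference list range(1, n+1), instead of threading an incrementing counter through nested loops with early return.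
import Mathlib
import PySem

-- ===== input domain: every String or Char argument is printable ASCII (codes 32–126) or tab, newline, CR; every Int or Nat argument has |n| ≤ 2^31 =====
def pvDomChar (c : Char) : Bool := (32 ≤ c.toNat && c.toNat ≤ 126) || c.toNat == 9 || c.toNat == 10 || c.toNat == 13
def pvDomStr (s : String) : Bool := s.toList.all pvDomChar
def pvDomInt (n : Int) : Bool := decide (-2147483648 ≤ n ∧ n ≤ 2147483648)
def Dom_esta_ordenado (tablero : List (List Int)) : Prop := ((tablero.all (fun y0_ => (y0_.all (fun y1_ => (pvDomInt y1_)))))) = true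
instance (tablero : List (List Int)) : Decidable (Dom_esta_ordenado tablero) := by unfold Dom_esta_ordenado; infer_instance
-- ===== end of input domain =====

-- B flattens the board and compares it against the reference list 1..n in one bulk equality; same result, simpler decomposition (not claimed faster).

-- ===== PORT A =====
-- inner loop over one row: none = early 'return False', some c = counter after the row
def pvRowA (c : Int) (fila : List Int) : Option Int :=
  match fila with
  | [] => some c
  | x :: xs => if x != c then none else pvRowA (c + 1) xs

def pvGoA (c : Int) (rows : List (List Int)) : Bool :=
  match rows with
  | [] => true
  | f :: rest =>
    match pvRowA c f with
    | none => false
    | some c' => pvGoA c' rest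

def esta_ordenado (tablero : List (List Int)) : Bool := pvGoA 1 tablero

-- ===== PORT B =====
def esta_ordenado_alt (tablero : List (List Int)) : Bool :=
  let flat := tablero.flatMap (fun fila => fila)
  decide (flat = (List.range flat.length).map (fun (i : Nat) => (1 : Int) + i))

-- ===== PRECONDITION & SPEC =====
def Spec_esta_ordenado (tablero : List (List Int)) (out : Bool) : Prop := out = esta_ordenado_alt tablero
instance (tablero : List (List Int)) (out : Bool) : Decidable (Spec_esta_ordenado tablero out) := by unfold Spec_esta_ordenado; infer_instance

-- ===== CLAIM (what is proved, stated in full; the proofs are below) =====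
def Claim_equal_esta_ordenado : Prop := ∀ (tablero : List (List Int)), Dom_esta_ordenado tablero → Spec_esta_ordenado tablero (esta_ordenado tablero)

-- ===== LEMMAS AND PROOFS =====

-- ===== VERDICT (by name: the statement is the Claim_ definition above) =====
-- single-list version of A's counter loop
def pvChk (c : Int) (l : List Int) : Bool :=
  match l with
  | [] => true
  | x :: xs => if x = c then pvChk (c + 1) xs else false

theorem pvRowA_chk (f : List Int) (c : Int) (ys : List Int) :
    (match pvRowA c f with
     | none => false
     | some c' => pvChk c' ys) = pvChk c (f ++ ys) := by
  induction f generalizing c with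
  | nil => simp [pvRowA]
  | cons x xs ih =>
    simp only [pvRowA, List.cons_append, pvChk, bne_iff_ne, ne_eq, ite_not]
    by_cases h : x = c <;> simp [h, ih]

theorem pvGoA_chk (rows : List (List Int)) (c : Int) :
    pvGoA c rows = pvChk c (rows.flatMap (fun fila => fila)) := by
  induction rows generalizing c with
  | nil => simp [pvGoA, pvChk]
  | cons f rest ih =>
    rw [List.flatMap_cons, ← pvRowA_chk f c]
    simp only [pvGoA]
    cases pvRowA c f <;> simp [ih]

theorem pvRange_shift (n : Nat) (c : Int) :
    (List.range (n + 1)).map (fun (i : Nat) => c + (i : Int)) =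
      c :: (List.range n).map (fun (i : Nat) => (c + 1) + (i : Int)) := by
  rw [List.range_succ_eq_map, List.map_cons, List.map_map]
  simp only [List.cons.injEq]
  refine ⟨by simp, ?_⟩
  apply List.map_congr_left
  intro i _
  simp only [Function.comp]
  push_cast
  ring

theorem pvChk_range (l : List Int) (c : Int) :
    pvChk c l = decide (l = (List.range l.length).map (fun (i : Nat) => c + (i : Int))) := by
  induction l generalizing c with
  | nil => simp [pvChk]
  | cons x xs ih =>
    rw [List.length_cons, pvRange_shift]
    by_cases h : x = c
    · simp [pvChk, h, ih]
    · simp [pvChk, h]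

-- ===== VERDICT (by name: the statement is the Claim_ definition above) =====
theorem esta_ordenado_spec : Claim_equal_esta_ordenado := by
  intro t _
  unfold Spec_esta_ordenado esta_ordenado esta_ordenado_alt
  rw [pvGoA_chk, pvChk_range]
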